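-- pv_equiv track=rewrite | github.com/Dhivya09sree/PAT-Task-3 | PAT_Task_3_tripletwithsum_9.py | find_triplet_with_sum
-- ===== SOURCE A (Python) =====
-- def find_triplet_with_sum(arr, target_sum):
--     # Get the length of the input list
--     n = len(arr)
--
--     # Iterate through all possible indices for the first element of the triplet
--     for i in range(n - 2):
--         # Iterate through all possible indices for the second element of the triplet
--         for j in range(i + 1, n - 1):
--             # Iterate through all possible indices for the third element of the triplet
--             for k in range(j + 1, n):
--                 # Check if the sum of the triplet (arr[i], arr[j], arr[k]) equals the target sum
--                 if arr[i] + arr[j] + arr[k] == target_sum: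
--                     # If the sum matches, return the triplet
--                     return [arr[i], arr[j], arr[k]]
--
--     # If no triplet with the desired sum is found, return None
--     return None
-- ===== SOURCE B (Python) =====
-- def find_triplet_with_sum(arr, target_sum):
--     # For each first index i, count the multiset of values after i, then sweep j:
--     # after removing arr[j] from the count, the needed third value exists strictly
--     # after j iff its count is still positive. O(n^2) instead of A's triple loop.
--     n = len(arr)
--     for i in range(n - 2):
--         cnt = {}
--         for v in arr[i + 1:]:
--             cnt[v] = cnt.get(v, 0) + 1
--         for j in range(i + 1, n - 1):
--             cnt[arr[j]] -= 1
--             need = target_sum - arr[i] - arr[j]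
--             if cnt.get(need, 0) > 0:
--                 return [arr[i], arr[j], need]
--     return None
-- ===== Notes on version B (the rewrite author's own statement) =====
-- stated objective: faster
-- what changed: A's innermost scan for the third element is replaced by a per-first-index value-count dictionary of the tail, decremented while sweeping the second index, so the third element is a single O(1) dictionary lookup (O(n^2) instead of O(n^3)).
import Mathlib
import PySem

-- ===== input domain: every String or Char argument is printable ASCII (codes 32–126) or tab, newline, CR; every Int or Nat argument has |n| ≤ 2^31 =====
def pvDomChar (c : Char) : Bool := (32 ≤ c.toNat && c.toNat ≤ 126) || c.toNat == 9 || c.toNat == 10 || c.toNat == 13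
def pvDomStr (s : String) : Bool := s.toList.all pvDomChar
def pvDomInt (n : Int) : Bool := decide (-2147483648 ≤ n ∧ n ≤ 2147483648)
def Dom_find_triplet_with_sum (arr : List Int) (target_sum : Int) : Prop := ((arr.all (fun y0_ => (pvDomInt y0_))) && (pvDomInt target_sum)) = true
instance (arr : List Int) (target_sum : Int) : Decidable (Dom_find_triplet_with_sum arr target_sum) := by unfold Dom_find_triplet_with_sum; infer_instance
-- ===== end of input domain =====

-- B replaces A's cubic triple index loop by, per first index i, a value-count
-- dictionary of the tail that is decremented while sweeping j, so the third
-- element is found by one dictionary lookup (objective: faster).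


-- ===== PORT A =====
-- innermost loop: for k in range(j+1, n): if arr[i]+arr[j]+arr[k] == target: return [...]
def pvA_loopK (arr : List Int) (t ai aj : Int) : List Int → Option (List Int)
  | [] => none
  | k :: ks =>
    match PySem.List.pyGet? arr k with
    | none => none        -- IndexError (unreachable: k is in range)
    | some ak => if ai + aj + ak = t then some [ai, aj, ak] else pvA_loopK arr t ai aj ks

-- middle loop: for j in range(i+1, n-1)
def pvA_loopJ (arr : List Int) (t n ai : Int) : List Int → Option (List Int)
  | [] => none
  | j :: js =>
    match PySem.List.pyGet? arr j with
    | none => none        -- IndexError (unreachable)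
    | some aj =>
      match pvA_loopK arr t ai aj (PySem.List.pyRange (j + 1) n 1) with
      | some r => some r  -- early return
      | none => pvA_loopJ arr t n ai js

-- outer loop: for i in range(n-2)
def pvA_loopI (arr : List Int) (t n : Int) : List Int → Option (List Int)
  | [] => none
  | i :: is =>
    match PySem.List.pyGet? arr i with
    | none => none        -- IndexError (unreachable)
    | some ai =>
      match pvA_loopJ arr t n ai (PySem.List.pyRange (i + 1) (n - 1) 1) with
      | some r => some r  -- early return
      | none => pvA_loopI arr t n is

def find_triplet_with_sum (arr : List Int) (target_sum : Int) : Option (List Int) :=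
  let n : Int := arr.length
  pvA_loopI arr target_sum n (PySem.List.pyRange 0 (n - 2) 1)

-- ===== PORT B =====
-- for v in arr[i+1:]: cnt[v] = cnt.get(v, 0) + 1
def pvB_buildCnt (vals : List Int) : PySem.Dict Int Int :=
  vals.foldl (fun d v => d.insert v (d.getD v 0 + 1)) PySem.Dict.empty

-- for j in range(i+1, n-1): cnt[arr[j]] -= 1; need = t - arr[i] - arr[j]; if cnt.get(need,0) > 0: return
def pvB_loopJ (arr : List Int) (t n ai : Int) (cnt : PySem.Dict Int Int) : List Int → Option (List Int)
  | [] => none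
  | j :: js =>
    match PySem.List.pyGet? arr j with
    | none => none        -- IndexError (unreachable)
    | some aj =>
      match cnt.get? aj with
      | none => none      -- KeyError from cnt[arr[j]] -= 1 (unreachable)
      | some c =>
        let cnt' := cnt.insert aj (c - 1)
        let need := t - ai - aj
        if cnt'.getD need 0 > 0 then some [ai, aj, need]
        else pvB_loopJ arr t n ai cnt' js

-- for i in range(n-2)
def pvB_loopI (arr : List Int) (t n : Int) : List Int → Option (List Int)
  | [] => none
  | i :: is =>
    match PySem.List.pyGet? arr i with
    | none => none        -- IndexError (unreachable)
    | some ai =>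
      match pvB_loopJ arr t n ai (pvB_buildCnt (PySem.List.slice arr (some (i + 1)) none))
            (PySem.List.pyRange (i + 1) (n - 1) 1) with
      | some r => some r  -- early return
      | none => pvB_loopI arr t n is

def find_triplet_with_sum_alt (arr : List Int) (target_sum : Int) : Option (List Int) :=
  let n : Int := arr.length
  pvB_loopI arr target_sum n (PySem.List.pyRange 0 (n - 2) 1)

-- ===== PRECONDITION & SPEC =====
def Spec_find_triplet_with_sum (arr : List Int) (target_sum : Int) (out : Option (List Int)) : Prop := out = find_triplet_with_sum_alt arr target_sum
instance (arr : List Int) (target_sum : Int) (out : Option (List Int)) : Decidable (Spec_find_triplet_with_sum arr target_sum out) := by unfold Spec_find_triplet_with_sum; infer_instance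

-- ===== CLAIM (what is proved, stated in full; the proofs are below) =====
def Claim_equal_find_triplet_with_sum : Prop := ∀ (arr : List Int) (target_sum : Int), Dom_find_triplet_with_sum arr target_sum → Spec_find_triplet_with_sum arr target_sum (find_triplet_with_sum arr target_sum)

-- ===== LEMMAS AND PROOFS =====

-- canonical form both ports are reduced to: scan pairs (second element y, its tail),
-- succeed on the first y whose complement occurs in the tail
def pvCanonJ (t ai : Int) : List Int → Option (List Int)
  | [] => none
  | y :: tail => if (t - ai - y) ∈ tail then some [ai, y, t - ai - y] else pvCanonJ t ai tail

def pvCanon (t : Int) : List Int → Option (List Int)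
  | [] => none
  | x :: rest =>
    match pvCanonJ t x rest with
    | some r => some r
    | none => pvCanon t rest

lemma pvCanonJ_cons (t ai y : Int) (tail : List Int) :
    pvCanonJ t ai (y :: tail) =
      (if (t - ai - y) ∈ tail then some [ai, y, t - ai - y] else pvCanonJ t ai tail) := rfl

lemma pvCanon_cons (t x : Int) (rest : List Int) :
    pvCanon t (x :: rest) =
      (match pvCanonJ t x rest with
       | some r => some r
       | none => pvCanon t rest) := rfl

lemma pvCanonJ_short (t ai : Int) (l : List Int) (h : l.length ≤ 1) : pvCanonJ t ai l = none := by
  rcases l with _ | ⟨x, _ | ⟨y, tl⟩⟩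
  · rfl
  · simp [pvCanonJ]
  · simp at h

lemma pvCanon_short (t : Int) (l : List Int) (h : l.length ≤ 2) : pvCanon t l = none := by
  rcases l with _ | ⟨x, _ | ⟨y, _ | ⟨z, tl⟩⟩⟩
  · rfl
  · simp [pvCanon, pvCanonJ]
  · simp [pvCanon, pvCanonJ]
  · simp at h

lemma pvA_loopK_eq (arr : List Int) (t ai aj : Int) :
    ∀ (d j : Nat), arr.length ≤ j + d →
      pvA_loopK arr t ai aj (PySem.List.pyRange (j : Int) (arr.length : Int) 1) =
        (if (t - ai - aj) ∈ arr.drop j then some [ai, aj, t - ai - aj] else none) := by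
  intro d
  induction d with
  | zero =>
    intro j hj
    rw [PySem.List.pyRange_one_eq_nil (by exact_mod_cast hj), List.drop_eq_nil_of_le (by omega)]
    simp [pvA_loopK]
  | succ d ih =>
    intro j hj
    by_cases h : arr.length ≤ j
    · rw [PySem.List.pyRange_one_eq_nil (by exact_mod_cast h), List.drop_eq_nil_of_le h]
      simp [pvA_loopK]
    · have hlt : j < arr.length := by omega
      rw [PySem.List.pyRange_one_cons (by exact_mod_cast hlt), List.drop_eq_getElem_cons hlt]
      simp only [pvA_loopK, PySem.List.pyGet?_natCast, List.getElem?_eq_getElem hlt]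
      by_cases hv : ai + aj + arr[j] = t
      · have hval : t - ai - aj = arr[j] := by omega
        have hmem : t - ai - aj ∈ arr[j] :: arr.drop (j + 1) := by
          rw [hval]; exact List.mem_cons_self
        rw [if_pos hv, if_pos hmem, hval]
      · have hcast : ((j : Int) + 1) = ((j + 1 : Nat) : Int) := by push_cast; ring
        rw [if_neg hv, hcast, ih (j + 1) (by omega)]
        have hne : t - ai - aj ≠ arr[j] := by omega
        by_cases hm : t - ai - aj ∈ arr.drop (j + 1)
        · rw [if_pos hm, if_pos (List.mem_cons_of_mem _ hm)]
        · rw [if_neg hm,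
            if_neg (fun hx => (List.mem_cons.mp hx).elim (fun h1 => hne h1) (fun h2 => hm h2))]

lemma pvA_loopJ_eq (arr : List Int) (t ai : Int) :
    ∀ (d j : Nat), arr.length ≤ j + d →
      pvA_loopJ arr t (arr.length : Int) ai (PySem.List.pyRange (j : Int) ((arr.length : Int) - 1) 1) =
        pvCanonJ t ai (arr.drop j) := by
  intro d
  induction d with
  | zero =>
    intro j hj
    rw [PySem.List.pyRange_one_eq_nil (by omega), List.drop_eq_nil_of_le (by omega)]
    rfl
  | succ d ih =>
    intro j hj
    by_cases h : arr.length ≤ j + 1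
    · rw [PySem.List.pyRange_one_eq_nil (by omega),
        pvCanonJ_short t ai _ (by simp; omega)]
      rfl
    · have hjlt : j < arr.length := by omega
      rw [PySem.List.pyRange_one_cons (by omega), List.drop_eq_getElem_cons hjlt]
      simp only [pvA_loopJ, PySem.List.pyGet?_natCast, List.getElem?_eq_getElem hjlt]
      have hcast : ((j : Int) + 1) = ((j + 1 : Nat) : Int) := by push_cast; ring
      rw [hcast, pvA_loopK_eq arr t ai arr[j] arr.length (j + 1) (by omega),
        pvCanonJ_cons]
      by_cases hm : (t - ai - arr[j]) ∈ arr.drop (j + 1)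
      · rw [if_pos hm, if_pos hm]
      · rw [if_neg hm, if_neg hm, ih (j + 1) (by omega)]

lemma pvA_loopI_eq (arr : List Int) (t : Int) :
    ∀ (d i : Nat), arr.length ≤ i + d →
      pvA_loopI arr t (arr.length : Int) (PySem.List.pyRange (i : Int) ((arr.length : Int) - 2) 1) =
        pvCanon t (arr.drop i) := by
  intro d
  induction d with
  | zero =>
    intro i hi
    rw [PySem.List.pyRange_one_eq_nil (by omega), List.drop_eq_nil_of_le (by omega)]
    rfl
  | succ d ih =>
    intro i hi
    by_cases h : arr.length ≤ i + 2
    · rw [PySem.List.pyRange_one_eq_nil (by omega),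
        pvCanon_short t _ (by simp; omega)]
      rfl
    · have hilt : i < arr.length := by omega
      rw [PySem.List.pyRange_one_cons (by omega), List.drop_eq_getElem_cons hilt]
      simp only [pvA_loopI, PySem.List.pyGet?_natCast, List.getElem?_eq_getElem hilt]
      have hcast : ((i : Int) + 1) = ((i + 1 : Nat) : Int) := by push_cast; ring
      rw [hcast, pvA_loopJ_eq arr t arr[i] arr.length (i + 1) (by omega),
        ih (i + 1) (by omega), pvCanon_cons]

lemma pvB_loopJ_eq (arr : List Int) (t ai : Int) :
    ∀ (d j : Nat) (cnt : PySem.Dict Int Int),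
      (∀ v, cnt.getD v 0 = ((arr.drop j).count v : Int)) →
      arr.length ≤ j + d →
      pvB_loopJ arr t (arr.length : Int) ai cnt (PySem.List.pyRange (j : Int) ((arr.length : Int) - 1) 1) =
        pvCanonJ t ai (arr.drop j) := by
  intro d
  induction d with
  | zero =>
    intro j cnt hc hj
    rw [PySem.List.pyRange_one_eq_nil (by omega), List.drop_eq_nil_of_le (by omega)]
    rfl
  | succ d ih =>
    intro j cnt hc hj
    by_cases h : arr.length ≤ j + 1
    · rw [PySem.List.pyRange_one_eq_nil (by omega),
        pvCanonJ_short t ai _ (by simp; omega)]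
      rfl
    · have hjlt : j < arr.length := by omega
      have hdrop : arr.drop j = arr[j] :: arr.drop (j + 1) := List.drop_eq_getElem_cons hjlt
      have hcount : ∀ v, (arr.drop j).count v
          = (arr.drop (j + 1)).count v + (if arr[j] = v then 1 else 0) := by
        intro v
        rw [hdrop, List.count_cons]
        by_cases hv : v = arr[j]
        · subst hv; simp
        · have hv' : ¬ arr[j] = v := fun h => hv h.symm
          simp [hv']
      rw [PySem.List.pyRange_one_cons (by omega), hdrop]
      simp only [pvB_loopJ, PySem.List.pyGet?_natCast, List.getElem?_eq_getElem hjlt]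
      have hcnt_pos : (0 : Int) < cnt.getD arr[j] 0 := by
        have hpos : 0 < (arr.drop j).count arr[j] :=
          List.count_pos_iff.mpr (by rw [hdrop]; exact List.mem_cons_self)
        rw [hc arr[j]]
        exact_mod_cast hpos
      rcases hget : cnt.get? arr[j] with _ | c
      · exfalso
        have : cnt.getD arr[j] 0 = 0 := by simp [PySem.Dict.getD, hget]
        omega
      dsimp only
      have hcval : c = ((arr.drop j).count arr[j] : Int) := by
        have := hc arr[j]
        simpa [PySem.Dict.getD, hget] using this
      -- the decremented dictionary counts the strict suffix drop (j+1)
      have hc' : ∀ v, (cnt.insert arr[j] (c - 1)).getD v 0 = ((arr.drop (j + 1)).count v : Int) := by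
        intro v
        by_cases hv : v = arr[j]
        · subst hv
          rw [PySem.Dict.getD_insert_self, hcval, hcount arr[j], if_pos rfl]
          push_cast
          ring
        · rw [PySem.Dict.getD_insert_of_ne _ _ _ hv, hc v, hcount v,
            if_neg (fun he => hv he.symm)]
          push_cast
          ring
      have hmem_iff : ((cnt.insert arr[j] (c - 1)).getD (t - ai - arr[j]) 0 > 0) ↔
          (t - ai - arr[j]) ∈ arr.drop (j + 1) := by
        rw [hc' (t - ai - arr[j])]
        constructor
        · intro hpos
          exact List.count_pos_iff.mp (by exact_mod_cast hpos)
        · intro hmem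
          exact_mod_cast List.count_pos_iff.mpr hmem
      rw [pvCanonJ_cons]
      by_cases hm : (t - ai - arr[j]) ∈ arr.drop (j + 1)
      · rw [if_pos (hmem_iff.mpr hm), if_pos hm]
      · rw [if_neg (fun hp => hm (hmem_iff.mp hp)), if_neg hm]
        have hcast : ((j : Int) + 1) = ((j + 1 : Nat) : Int) := by push_cast; ring
        rw [hcast, ih (j + 1) _ hc' (by omega)]

lemma pvB_buildCnt_getD (vals : List Int) (v : Int) :
    (pvB_buildCnt vals).getD v 0 = (vals.count v : Int) := by
  unfold pvB_buildCnt
  rw [PySem.Dict.foldl_insert_getD_add_one_eq_counter]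
  simpa using PySem.Dict.getD_counter vals v

lemma pvB_loopI_eq (arr : List Int) (t : Int) :
    ∀ (d i : Nat), arr.length ≤ i + d →
      pvB_loopI arr t (arr.length : Int) (PySem.List.pyRange (i : Int) ((arr.length : Int) - 2) 1) =
        pvCanon t (arr.drop i) := by
  intro d
  induction d with
  | zero =>
    intro i hi
    rw [PySem.List.pyRange_one_eq_nil (by omega), List.drop_eq_nil_of_le (by omega)]
    rfl
  | succ d ih =>
    intro i hi
    by_cases h : arr.length ≤ i + 2
    · rw [PySem.List.pyRange_one_eq_nil (by omega),
        pvCanon_short t _ (by simp; omega)]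
      rfl
    · have hilt : i < arr.length := by omega
      rw [PySem.List.pyRange_one_cons (by omega), List.drop_eq_getElem_cons hilt]
      simp only [pvB_loopI, PySem.List.pyGet?_natCast, List.getElem?_eq_getElem hilt]
      have hcast : ((i : Int) + 1) = ((i + 1 : Nat) : Int) := by push_cast; ring
      have hslice : PySem.List.slice arr (some ((i : Int) + 1)) none = arr.drop (i + 1) := by
        rw [hcast, PySem.List.slice_from_natCast]
      rw [hslice, hcast,
        pvB_loopJ_eq arr t arr[i] arr.length (i + 1) _
          (fun v => pvB_buildCnt_getD (arr.drop (i + 1)) v) (by omega),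
        ih (i + 1) (by omega), pvCanon_cons]

lemma pvA_eq_canon (arr : List Int) (t : Int) :
    find_triplet_with_sum arr t = pvCanon t arr := by
  unfold find_triplet_with_sum
  have := pvA_loopI_eq arr t arr.length 0 (by omega)
  simpa using this

lemma pvB_eq_canon (arr : List Int) (t : Int) :
    find_triplet_with_sum_alt arr t = pvCanon t arr := by
  unfold find_triplet_with_sum_alt
  have := pvB_loopI_eq arr t arr.length 0 (by omega)
  simpa using this

-- ===== VERDICT (by name: the statement is the Claim_ definition above) =====
theorem find_triplet_with_sum_spec : Claim_equal_find_triplet_with_sum := by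
  intro arr t _
  unfold Spec_find_triplet_with_sum
  rw [pvA_eq_canon, pvB_eq_canon]
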